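-- pv_equiv track=rewrite | github.com/ku-cms/TrackerDAQ | python/BERT_Analyze.py | findMin_v1
-- ===== SOURCE A (Python) =====
-- def findMin_v1(x_values, y_values):
--     n = len(x_values)
--     # search data starting with the last point
--     # iterate over list backwards
--     for i in range(n-1, -1, -1):
--         if y_values[i] > 0:
--             if i < n - 1:
--                 # found min TAP0
--                 return x_values[i + 1]
--             else:
--                 # did not find min TAP0
--                 return -1
--     # did not find min TAP0
--     return -1
-- ===== SOURCE B (Python) =====
-- def findMin_v1(x_values, y_values):
--     # Staged: handle the tail specially, then collect candidate next-x values
--     # for every positive y among the first n-1 positions, and take the last one.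
--     n = len(x_values)
--     if n > 0 and y_values[n - 1] > 0:
--         return -1
--     candidates = [x_values[i + 1] for i in range(n - 1) if y_values[i] > 0]
--     if candidates:
--         return candidates[-1]
--     return -1
-- ===== Notes on version B (the rewrite author's own statement) =====
-- stated objective: alternative
-- what changed: B is staged: it first dispatches the special tail case (positive y at the last x position returns -1), then builds via a filtered comprehension the list of candidate next-x values over the first n-1 positions and returns its last element, replacing A's backward early-exit scan with nested branches.
import Mathlib
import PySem

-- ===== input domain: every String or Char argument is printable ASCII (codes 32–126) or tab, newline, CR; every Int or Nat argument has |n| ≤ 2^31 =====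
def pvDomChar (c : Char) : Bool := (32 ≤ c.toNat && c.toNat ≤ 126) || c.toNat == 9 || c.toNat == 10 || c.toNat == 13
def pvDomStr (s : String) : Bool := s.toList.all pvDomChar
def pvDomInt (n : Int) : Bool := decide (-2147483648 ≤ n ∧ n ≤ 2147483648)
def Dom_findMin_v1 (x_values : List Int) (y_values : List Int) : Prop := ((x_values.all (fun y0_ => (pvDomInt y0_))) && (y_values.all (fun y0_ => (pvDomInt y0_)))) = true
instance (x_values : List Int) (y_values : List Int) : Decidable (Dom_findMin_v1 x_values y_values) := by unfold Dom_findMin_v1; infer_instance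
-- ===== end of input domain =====

-- B is staged: special-case the tail, then a filtered comprehension of candidate next-x values, last one wins.

-- ===== PORT A =====
-- the backward for-loop with early returns, as structural recursion over range(n-1,-1,-1)
def findMin_v1_loopA (x_values y_values : List Int) (n : Int) : List Int → Int
  | [] => -1
  | i :: rest =>
      if (PySem.List.pyGetD y_values i 0) > 0 then
        if i < n - 1 then PySem.List.pyGetD x_values (i + 1) 0 else -1
      else findMin_v1_loopA x_values y_values n rest

def findMin_v1 (x_values : List Int) (y_values : List Int) : Int :=
  let n : Int := x_values.length
  findMin_v1_loopA x_values y_values n (PySem.List.pyRange (n - 1) (-1) (-1))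

-- ===== PORT B =====
def findMin_v1_alt (x_values : List Int) (y_values : List Int) : Int :=
  let n : Int := x_values.length
  if n > 0 ∧ PySem.List.pyGetD y_values (n - 1) 0 > 0 then -1
  else
    let candidates : List Int :=
      (PySem.List.pyRange 0 (n - 1) 1).foldr
        (fun i acc => if PySem.List.pyGetD y_values i 0 > 0
                      then PySem.List.pyGetD x_values (i + 1) 0 :: acc else acc) []
    match candidates.getLast? with
    | some v => v
    | none => -1

-- ===== PRECONDITION & SPEC =====
-- Pre_ excludes exactly the inputs where A raises IndexError: y_values shorter than a nonempty x_values.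
def Pre_findMin_v1 (x_values : List Int) (y_values : List Int) : Prop :=
  x_values = [] ∨ x_values.length ≤ y_values.length
instance (x_values : List Int) (y_values : List Int) : Decidable (Pre_findMin_v1 x_values y_values) := by unfold Pre_findMin_v1; infer_instance
def pvWitness_findMin_v1 : List Int × List Int := ([2, 4, 6], [1, 1, 0])

def Spec_findMin_v1 (x_values : List Int) (y_values : List Int) (out : Int) : Prop := out = findMin_v1_alt x_values y_values
instance (x_values : List Int) (y_values : List Int) (out : Int) : Decidable (Spec_findMin_v1 x_values y_values out) := by unfold Spec_findMin_v1; infer_instance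

-- ===== CLAIM (what is proved, stated in full; the proofs are below) =====
def Claim_equal_findMin_v1 : Prop := ∀ (x_values : List Int) (y_values : List Int), Dom_findMin_v1 x_values y_values → Pre_findMin_v1 x_values y_values → Spec_findMin_v1 x_values y_values (findMin_v1 x_values y_values)

-- ===== LEMMAS AND PROOFS =====

-- A's loop = branch on the first index in the list with positive y
theorem loopA_eq_find (x y : List Int) (n : Int) (l : List Int) :
    findMin_v1_loopA x y n l =
      match l.find? (fun i => decide ((PySem.List.pyGetD y i 0) > 0)) with
      | some i => if i < n - 1 then PySem.List.pyGetD x (i + 1) 0 else -1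
      | none => -1 := by
  induction l with
  | nil => rfl
  | cons a t ih =>
      simp only [findMin_v1_loopA, List.find?]
      by_cases h : (PySem.List.pyGetD y a 0) > 0
      · simp [h]
      · simp [h, ih]

-- B's foldr builds (l.filter p).map g
theorem foldr_filterMap (p : Int → Prop) [DecidablePred p] (g : Int → Int) (l : List Int) :
    l.foldr (fun i acc => if p i then g i :: acc else acc) [] =
      (l.filter (fun i => decide (p i))).map g := by
  induction l with
  | nil => rfl
  | cons a t ih =>
      simp only [List.foldr, List.filter]
      by_cases h : p a <;> simp [h, ih]

-- last of the filtered-mapped list = g of the first match in the reversed list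
theorem getLast_filter_map_eq_find (p : Int → Prop) [DecidablePred p] (g : Int → Int) (l : List Int) :
    ((l.filter (fun i => decide (p i))).map g).getLast? =
      (l.reverse.find? (fun i => decide (p i))).map g := by
  induction l using List.reverseRecOn with
  | nil => rfl
  | append_singleton t a ih =>
      rw [List.filter_append, List.map_append, List.reverse_append]
      simp only [List.reverse_singleton, List.singleton_append, List.find?, List.filter]
      by_cases h : p a
      · simp [h]
      · simp [h, ih]

-- ===== VERDICT (by name: the statement is the Claim_ definition above) =====
theorem findMin_v1_spec : Claim_equal_findMin_v1 := by
  intro x y _ _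
  unfold Spec_findMin_v1 findMin_v1 findMin_v1_alt
  simp only []
  rw [PySem.List.pyRange_neg_one_eq_reverse]
  norm_num
  rw [loopA_eq_find]
  rw [foldr_filterMap (fun i => PySem.List.pyGetD y i 0 > 0) (fun i => PySem.List.pyGetD x (i+1) 0),
      getLast_filter_map_eq_find]
  by_cases hn : (0:Int) < (x.length : Int)
  · -- split range(0,n) = range(0,n-1) ++ [n-1]
    have hsplit : PySem.List.pyRange 0 (x.length : Int) 1
        = PySem.List.pyRange 0 ((x.length : Int) - 1) 1 ++ [(x.length : Int) - 1] := by
      have := PySem.List.pyRange_one_succ_right (a := 0) (b := (x.length : Int) - 1) (by omega)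
      simpa using this
    rw [hsplit, List.reverse_append]
    simp only [List.reverse_singleton, List.singleton_append, List.find?]
    have hx : x ≠ [] := by intro h; rw [h] at hn; simp at hn
    by_cases hlast : PySem.List.pyGetD y ((x.length : Int) - 1) 0 > 0
    · simp [hlast, hx]
    · have hguard : ¬ ((0:Int) < (x.length : Int) ∧ PySem.List.pyGetD y ((x.length : Int) - 1) 0 > 0) := by
        intro h; exact hlast h.2
      simp only [hlast, decide_false]
      cases hf : (PySem.List.pyRange 0 ((x.length : Int) - 1) 1).reverse.find?
          (fun i => decide (PySem.List.pyGetD y i 0 > 0)) with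
      | none => simp
      | some i =>
          have hmem : i ∈ (PySem.List.pyRange 0 ((x.length : Int) - 1) 1).reverse :=
            List.mem_of_find?_eq_some hf
          rw [List.mem_reverse, PySem.List.mem_pyRange_one] at hmem
          have hlt : i < (x.length : Int) - 1 := hmem.2
          simp [hlt]
  · -- n = 0 (length is nonnegative)
    have h0 : (x.length : Int) = 0 := by omega
    simp [h0, PySem.List.pyRange_one_eq_nil]
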